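-- pv_equiv track=rewrite | github.com/rileygh/TuringMachineInterpreter | interpreter.py | parse
-- ===== SOURCE A (Python) =====
-- def parse(data):
--     '''Parse the processed data from the read_machine function'''
--     alphabet, tape, head_position, current_state, accepting_states, rules = '', [], 0, '', [], []
--
--     for i, j in data:
--         match i:
--             case 'alphabet':
--                 alphabet += j
--
--             case 'tape':
--                 for c in j:
--                     tape.append(c)
--
--             case 'tape_offset':
--                 head_position += int(j)
--
--             case 'start_state':
--                 current_state += j
--
--             case 'accepting_states':
--                 states: List[str] = j.split(' ')
--                 for state in states:
--                     accepting_states.append(state)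
--
--             case 'rule':
--                 rules.append(j.split(' '))
--
--     return alphabet, tape, head_position, current_state, accepting_states, rules
-- ===== SOURCE B (Python) =====
-- def parse(data):
--     '''Parse the processed data from the read_machine function'''
--     def group(key):
--         return [v for k, v in data if k == key]
--
--     alphabet = ''.join(group('alphabet'))
--     tape = list(''.join(group('tape')))
--     head_position = sum(int(x) for x in group('tape_offset'))
--     current_state = ''.join(group('start_state'))
--     accepting_states = [s for v in group('accepting_states') for s in v.split(' ')]
--     rules = [v.split(' ') for v in group('rule')]
--     return alphabet, tape, head_position, current_state, accepting_states, rules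
-- ===== Notes on version B (the rewrite author's own statement) =====
-- stated objective: alternative
-- what changed: Replaces the single mutating dispatch loop over six accumulators by partition-then-reduce: values are first grouped per key, then each of the six output fields is computed independently from its group (join / list / sum / flat split / map split).
import Mathlib
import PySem

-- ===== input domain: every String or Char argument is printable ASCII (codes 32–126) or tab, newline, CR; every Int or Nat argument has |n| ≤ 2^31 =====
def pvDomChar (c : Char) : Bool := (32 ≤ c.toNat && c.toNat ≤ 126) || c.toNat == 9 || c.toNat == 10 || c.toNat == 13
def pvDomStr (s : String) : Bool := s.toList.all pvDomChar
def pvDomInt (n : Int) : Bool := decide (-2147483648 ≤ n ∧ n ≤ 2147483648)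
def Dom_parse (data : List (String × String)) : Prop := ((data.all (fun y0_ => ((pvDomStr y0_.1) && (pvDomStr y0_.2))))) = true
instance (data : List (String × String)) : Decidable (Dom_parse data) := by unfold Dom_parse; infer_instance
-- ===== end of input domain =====

-- B replaces A's single mutating dispatch loop by a grouping pass followed by six
-- independent per-field reductions (alternative decomposition, same cost).

-- ===== PORT A =====
-- one iteration of A's 'for i, j in data' loop over the six accumulators
def parseStep (st : String × List String × Int × String × List String × List (List String))
    (p : String × String) : String × List String × Int × String × List String × List (List String) :=
  match st, p with
  | (alphabet, tape, head_position, current_state, accepting_states, rules), (i, j) =>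
    if i = "alphabet" then (alphabet ++ j, tape, head_position, current_state, accepting_states, rules)
    else if i = "tape" then
      (alphabet, j.toList.foldl (fun t c => t ++ [String.ofList [c]]) tape, head_position, current_state, accepting_states, rules)
    else if i = "tape_offset" then
      -- int(j): Pre_parse guarantees ofStr? j is some; Python raises ValueError otherwise
      (alphabet, tape, head_position + (PySem.Int.ofStr? j).getD 0, current_state, accepting_states, rules)
    else if i = "start_state" then (alphabet, tape, head_position, current_state ++ j, accepting_states, rules)
    else if i = "accepting_states" then
      (alphabet, tape, head_position, current_state, ((PySem.Str.split? j " ").getD []).foldl (fun a s => a ++ [s]) accepting_states, rules)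
    else if i = "rule" then (alphabet, tape, head_position, current_state, accepting_states, rules ++ [(PySem.Str.split? j " ").getD []])
    else (alphabet, tape, head_position, current_state, accepting_states, rules)

def parse (data : List (String × String)) : String × List String × Int × String × List String × List (List String) :=
  data.foldl parseStep ("", [], 0, "", [], [])

-- ===== PORT B =====
-- group(key) = [v for k, v in data if k == key]
def pvGroup (data : List (String × String)) (key : String) : List String :=
  (data.filter (fun p => p.1 == key)).map (fun p => p.2)

def parse_alt (data : List (String × String)) : String × List String × Int × String × List String × List (List String) :=
  (PySem.Str.join "" (pvGroup data "alphabet"),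
   (PySem.Str.join "" (pvGroup data "tape")).toList.map (fun c => String.ofList [c]),
   ((pvGroup data "tape_offset").map (fun x => (PySem.Int.ofStr? x).getD 0)).foldl (· + ·) 0,
   PySem.Str.join "" (pvGroup data "start_state"),
   (pvGroup data "accepting_states").flatMap (fun v => (PySem.Str.split? v " ").getD []),
   (pvGroup data "rule").map (fun v => (PySem.Str.split? v " ").getD []))

-- ===== PRECONDITION & SPEC =====
-- Pre_ excludes exactly the inputs where int(j) raises ValueError in A (B raises there too).
def Pre_parse (data : List (String × String)) : Prop :=
  (data.all (fun p => p.1 != "tape_offset" || (PySem.Int.ofStr? p.2).isSome)) = true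
instance (data : List (String × String)) : Decidable (Pre_parse data) := by unfold Pre_parse; infer_instance
def pvWitness_parse : (List (String × String)) :=
  [("alphabet", "ab"), ("tape", "aba"), ("tape_offset", "2"), ("start_state", "q0"),
   ("accepting_states", "q1 q2"), ("rule", "q0 a b R q1")]
def Spec_parse (data : List (String × String)) (out : String × List String × Int × String × List String × List (List String)) : Prop := out = parse_alt data
instance (data : List (String × String)) (out : String × List String × Int × String × List String × List (List String)) : Decidable (Spec_parse data out) := by unfold Spec_parse; infer_instance

-- ===== CLAIM (what is proved, stated in full; the proofs are below) =====
def Claim_equal_parse : Prop := ∀ (data : List (String × String)), Dom_parse data → Pre_parse data → Spec_parse data (parse data)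

-- ===== LEMMAS AND PROOFS =====

-- '' .join of a cons
theorem pvJoinNilCons (x : List Char) (xs : List (List Char)) :
    PySem.Chars.join [] (x :: xs) = x ++ PySem.Chars.join [] xs := by
  cases xs with
  | nil => simp [PySem.Chars.join_singleton, PySem.Chars.join_nil]
  | cons y r => rw [PySem.Chars.join_cons_cons]; simp

theorem pvFoldlAppend {α β : Type} (f : α → β) (l : List α) (a : List β) :
    l.foldl (fun t c => t ++ [f c]) a = a ++ l.map f := by
  induction l generalizing a with
  | nil => simp
  | cons x r ih => simp [ih, List.append_assoc]

theorem pvFoldlAppendId {α : Type} (l : List α) (a : List α) :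
    l.foldl (fun t c => t ++ [c]) a = a ++ l := by
  induction l generalizing a with
  | nil => simp
  | cons x r ih => simp [ih]

theorem pvFoldlAdd (l : List Int) (h : Int) :
    l.foldl (· + ·) h = h + l.foldl (· + ·) 0 := by
  induction l generalizing h with
  | nil => simp
  | cons x r ih => simp only [List.foldl_cons]; rw [ih, ih (0 + x)]; ring_nf

theorem pvLoopEq (data : List (String × String))
    (a : String) (t : List String) (h : Int) (c : String) (acc : List String) (r : List (List String)) :
    data.foldl parseStep (a, t, h, c, acc, r) =
      (a ++ PySem.Str.join "" (pvGroup data "alphabet"),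
       t ++ (PySem.Str.join "" (pvGroup data "tape")).toList.map (fun ch => String.ofList [ch]),
       h + ((pvGroup data "tape_offset").map (fun x => (PySem.Int.ofStr? x).getD 0)).foldl (· + ·) 0,
       c ++ PySem.Str.join "" (pvGroup data "start_state"),
       acc ++ (pvGroup data "accepting_states").flatMap (fun v => (PySem.Str.split? v " ").getD []),
       r ++ (pvGroup data "rule").map (fun v => (PySem.Str.split? v " ").getD [])) := by
  induction data generalizing a t h c acc r with
  | nil => simp [pvGroup, PySem.Str.join]
  | cons p rest ih =>
    obtain ⟨i, j⟩ := p
    simp only [List.foldl_cons, parseStep]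
    by_cases h1 : i = "alphabet"
    · subst h1
      rw [if_pos rfl, ih]
      simp [pvGroup, String.ext_iff, pvJoinNilCons]
    · rw [if_neg h1]
      by_cases h2 : i = "tape"
      · subst h2
        rw [if_pos rfl, ih, pvFoldlAppend (fun ch => String.ofList [ch]) j.toList t]
        simp [pvGroup, pvJoinNilCons, List.append_assoc]
      · rw [if_neg h2]
        by_cases h3 : i = "tape_offset"
        · subst h3
          rw [if_pos rfl, ih]
          simp [pvGroup]
          rw [add_assoc]
          exact congrArg (h + ·) ((pvFoldlAdd _ _).symm)
        · rw [if_neg h3]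
          by_cases h4 : i = "start_state"
          · subst h4
            rw [if_pos rfl, ih]
            simp [pvGroup, String.ext_iff, pvJoinNilCons]
          · rw [if_neg h4]
            by_cases h5 : i = "accepting_states"
            · subst h5
              rw [if_pos rfl, pvFoldlAppendId, ih]
              simp [pvGroup, List.append_assoc]
            · rw [if_neg h5]
              by_cases h6 : i = "rule"
              · subst h6
                rw [if_pos rfl, ih]
                simp [pvGroup, List.append_assoc]
              · rw [if_neg h6, ih]
                simp [pvGroup, h1, h2, h3, h4, h5, h6]

-- ===== VERDICT (by name: the statement is the Claim_ definition above) =====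
theorem parse_spec : Claim_equal_parse := by
  intro data _ _
  unfold Spec_parse parse parse_alt
  rw [pvLoopEq]
  simp
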